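-- pv_equiv track=rewrite | github.com/Mengistu1225/pythonDSA | main1.py | ArrayChallenge
-- ===== SOURCE A (Python) =====
-- def ArrayChallenge(arr):
--    """
--    Determines the number of ways two students can be seated next to each other in a classroom with a two-column desk arrangement.
--
--    Args:
--        arr: An array of integers in the format [K, r1, r2, r3, ...], where:
--            - K represents the number of desks in the classroom.
--            - r1, r2, r3, ... represent occupied desks in sorted order.
--
--    Returns:
--        The number of ways two students can be seated next to each other.
--    """
--
--    K = arr[0]  # Total number of desks
--    occupied_desks = set(arr[1:])  # Set of occupied desks for efficient lookup
--    varOcg = 0  # __define-ocg__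
--
--    available_pairs = 0
--
--    # Iterate through each available desk
--    for desk in range(1, K + 1):
--        if desk not in occupied_desks:
--            # Check for adjacent desks in the same column
--            if desk + 1 <= K and desk + 1 not in occupied_desks:
--                available_pairs += 1
--
--            # Check for adjacent desk in the other column (taking odd/even desk numbers into account)
--            adjacent_desk = desk + K if desk % 2 == 1 else desk - K
--            if 1 <= adjacent_desk <= K and adjacent_desk not in occupied_desks:
--                available_pairs += 1
--
--    return available_pairs
-- ===== SOURCE B (Python) =====
-- def ArrayChallenge(arr):
--     # Closed-form: (K-1) adjacent pairs total, minus pairs blocked by occupied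
--     # desks (inclusion-exclusion over the occupied desks only).
--     K = arr[0]
--     occ = set(d for d in arr[1:] if 1 <= d <= K)
--     total = K - 1 if K >= 1 else 0
--     blocked = 0
--     for d in occ:
--         if d >= 2:
--             blocked += 1
--         if d <= K - 1:
--             blocked += 1
--         if d + 1 <= K and d + 1 in occ:
--             blocked -= 1
--     return total - blocked
-- ===== Notes on version B (the rewrite author's own statement) =====
-- stated objective: faster
-- what changed: A scans all K desks testing each free desk and its neighbour; B computes the answer in closed form as (K-1) total adjacent pairs minus blocked pairs by inclusion-exclusion over only the occupied desks, never iterating over the K desks.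
import Mathlib
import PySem

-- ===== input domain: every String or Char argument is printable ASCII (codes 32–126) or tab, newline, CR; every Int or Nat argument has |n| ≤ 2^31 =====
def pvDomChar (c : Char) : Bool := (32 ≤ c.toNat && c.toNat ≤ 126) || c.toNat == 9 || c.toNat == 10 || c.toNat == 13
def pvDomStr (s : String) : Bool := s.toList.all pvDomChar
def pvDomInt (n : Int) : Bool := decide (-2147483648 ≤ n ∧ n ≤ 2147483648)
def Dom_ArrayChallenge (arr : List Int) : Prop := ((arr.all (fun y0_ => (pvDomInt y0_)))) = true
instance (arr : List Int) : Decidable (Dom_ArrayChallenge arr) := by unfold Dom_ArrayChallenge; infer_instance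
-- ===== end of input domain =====

-- B replaces A's scan over all K desks by inclusion-exclusion over the occupied desks only
-- (total K-1 adjacent pairs minus blocked ones): faster when K is large and few desks are occupied.

-- ===== PORT A =====
def ArrayChallenge (arr : List Int) : Int :=
  let K := PySem.List.pyGetD arr 0 0
  let occupied_desks : PySem.Set Int := PySem.Set.ofList (PySem.List.slice arr (some 1) none)
  (PySem.List.pyRange 1 (K + 1) 1).foldl (fun available_pairs desk =>
    if desk ∉ occupied_desks then
      let available_pairs :=
        if desk + 1 ≤ K ∧ desk + 1 ∉ occupied_desks then available_pairs + 1 else available_pairs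
      let adjacent_desk := if PySem.Int.mod desk 2 = 1 then desk + K else desk - K
      if 1 ≤ adjacent_desk ∧ adjacent_desk ≤ K ∧ adjacent_desk ∉ occupied_desks then
        available_pairs + 1
      else available_pairs
    else available_pairs) 0

-- ===== PORT B =====
def ArrayChallenge_alt (arr : List Int) : Int :=
  let K := PySem.List.pyGetD arr 0 0
  let occ : PySem.Set Int :=
    PySem.Set.ofList ((PySem.List.slice arr (some 1) none).filter (fun d => decide (1 ≤ d ∧ d ≤ K)))
  let total := if 1 ≤ K then K - 1 else 0
  let blocked := occ.foldl (fun blocked d =>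
      let blocked := if 2 ≤ d then blocked + 1 else blocked
      let blocked := if d ≤ K - 1 then blocked + 1 else blocked
      if d + 1 ≤ K ∧ d + 1 ∈ occ then blocked - 1 else blocked) 0
  total - blocked

-- ===== PRECONDITION & SPEC =====
-- Pre_ excludes only the empty list, on which Python A raises IndexError reading the desk count.
def Pre_ArrayChallenge (arr : List Int) : Prop := arr ≠ []
instance (arr : List Int) : Decidable (Pre_ArrayChallenge arr) := by unfold Pre_ArrayChallenge; infer_instance
def pvWitness_ArrayChallenge : List Int := [5, 2]

def Spec_ArrayChallenge (arr : List Int) (out : Int) : Prop := out = ArrayChallenge_alt arr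
instance (arr : List Int) (out : Int) : Decidable (Spec_ArrayChallenge arr out) := by unfold Spec_ArrayChallenge; infer_instance

-- ===== CLAIM (what is proved, stated in full; the proofs are below) =====
def Claim_equal_ArrayChallenge : Prop := ∀ (arr : List Int), Dom_ArrayChallenge arr → Pre_ArrayChallenge arr → Spec_ArrayChallenge arr (ArrayChallenge arr)

-- ===== LEMMAS AND PROOFS =====

-- A's loop body, with the dead "other column" branch removed, is a 0/1 count.
theorem stepA (K : Int) (t : List Int) :
    (PySem.List.pyRange 1 (K + 1) 1).foldl (fun available_pairs desk =>
      if desk ∉ PySem.Set.ofList t then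
        let available_pairs :=
          if desk + 1 ≤ K ∧ desk + 1 ∉ PySem.Set.ofList t then available_pairs + 1 else available_pairs
        let adjacent_desk := if PySem.Int.mod desk 2 = 1 then desk + K else desk - K
        if 1 ≤ adjacent_desk ∧ adjacent_desk ≤ K ∧ adjacent_desk ∉ PySem.Set.ofList t then
          available_pairs + 1
        else available_pairs
      else available_pairs) 0
    = ((PySem.List.pyRange 1 (K + 1) 1).countP
        (fun d => decide (d ∉ PySem.Set.ofList t ∧ d + 1 ≤ K ∧ d + 1 ∉ PySem.Set.ofList t)) : Int) := by
  rw [PySem.List.foldl_congr_mem _ _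
      (fun acc d => if (decide (d ∉ PySem.Set.ofList t ∧ d + 1 ≤ K ∧ d + 1 ∉ PySem.Set.ofList t)) = true
        then acc + 1 else acc) 0 ?_]
  · rw [PySem.List.foldl_count_if]; simp
  · intro acc desk hd
    rw [PySem.List.mem_pyRange_one] at hd
    by_cases hS : desk ∈ PySem.Set.ofList t
    · simp [hS]
    · have hdead : ¬ (1 ≤ (if PySem.Int.mod desk 2 = 1 then desk + K else desk - K) ∧
          (if PySem.Int.mod desk 2 = 1 then desk + K else desk - K) ≤ K ∧
          (if PySem.Int.mod desk 2 = 1 then desk + K else desk - K) ∉ PySem.Set.ofList t) := by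
        rintro ⟨h1, h2, -⟩
        split_ifs at h1 h2 <;> omega
      simp only [hS, not_false_iff, if_true, hdead, if_false, decide_eq_true_eq]
      split_ifs with h1 h2 h3 <;> first | rfl | (exfalso; tauto)

-- B's loop is a sum of signed indicators over the distinct occupied desks.
theorem stepB (K : Int) (occ : List Int) :
    occ.foldl (fun blocked d =>
      let blocked := if 2 ≤ d then blocked + 1 else blocked
      let blocked := if d ≤ K - 1 then blocked + 1 else blocked
      if d + 1 ≤ K ∧ d + 1 ∈ occ then blocked - 1 else blocked) 0
    = (occ.map (fun d => (if 2 ≤ d then (1 : Int) else 0) + (if d ≤ K - 1 then 1 else 0)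
        - (if d + 1 ≤ K ∧ d + 1 ∈ occ then 1 else 0))).sum := by
  rw [PySem.List.foldl_congr_mem occ _
      (fun blocked d => blocked + ((if 2 ≤ d then (1 : Int) else 0) + (if d ≤ K - 1 then 1 else 0)
        - (if d + 1 ≤ K ∧ d + 1 ∈ occ then 1 else 0))) 0
      (by intro acc x _; simp only []; split_ifs <;> ring)]
  rw [PySem.List.foldl_add]
  simp

-- The central counting identity (inclusion-exclusion over a Finset of occupied desks).
theorem count_ix (K : Int) (hK : 1 ≤ K) (F : Finset Int) :
    (((Finset.Icc 1 (K - 1)).filter (fun i => i ∉ F ∧ i + 1 ∉ F)).card : Int)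
    = (K - 1) - ∑ d ∈ F.filter (fun d => 1 ≤ d ∧ d ≤ K),
        ((if 2 ≤ d then (1 : Int) else 0) + (if d ≤ K - 1 then 1 else 0)
          - (if d + 1 ≤ K ∧ d + 1 ∈ F then 1 else 0)) := by
  set I := Finset.Icc 1 (K - 1) with hI
  set T := F.filter (fun d => 1 ≤ d ∧ d ≤ K) with hT
  have hsplit : ∑ d ∈ T, ((if 2 ≤ d then (1 : Int) else 0) + (if d ≤ K - 1 then 1 else 0)
          - (if d + 1 ≤ K ∧ d + 1 ∈ F then 1 else 0))
      = (∑ d ∈ T, (if 2 ≤ d then (1 : Int) else 0)) + (∑ d ∈ T, (if d ≤ K - 1 then (1 : Int) else 0))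
        - (∑ d ∈ T, (if d + 1 ≤ K ∧ d + 1 ∈ F then (1 : Int) else 0)) := by
    rw [Finset.sum_sub_distrib, Finset.sum_add_distrib]
  have h1 : (∑ d ∈ T, (if 2 ≤ d then (1 : Int) else 0)) = ((T.filter (fun d => 2 ≤ d)).card : Int) := by
    rw [Finset.sum_boole]
  have h2 : (∑ d ∈ T, (if d ≤ K - 1 then (1 : Int) else 0)) = ((T.filter (fun d => d ≤ K - 1)).card : Int) := by
    rw [Finset.sum_boole]
  have h3 : (∑ d ∈ T, (if d + 1 ≤ K ∧ d + 1 ∈ F then (1 : Int) else 0))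
      = ((T.filter (fun d => d + 1 ≤ K ∧ d + 1 ∈ F)).card : Int) := by
    rw [Finset.sum_boole]
  have e1 : T.filter (fun d => d ≤ K - 1) = I.filter (fun i => i ∈ F) := by
    ext d
    simp only [hT, hI, Finset.mem_filter, Finset.mem_Icc]
    constructor
    · rintro ⟨⟨hF, ha, _⟩, hb⟩; exact ⟨⟨ha, hb⟩, hF⟩
    · rintro ⟨⟨ha, hb⟩, hF⟩; exact ⟨⟨hF, ha, by omega⟩, hb⟩
  have e2 : T.filter (fun d => 2 ≤ d) = (I.filter (fun i => i + 1 ∈ F)).image (fun i => i + 1) := by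
    ext d
    simp only [hT, hI, Finset.mem_filter, Finset.mem_Icc, Finset.mem_image]
    constructor
    · rintro ⟨⟨hF, ha, hb⟩, hc⟩
      exact ⟨d - 1, ⟨⟨by omega, by omega⟩, by simpa using hF⟩, by ring⟩
    · rintro ⟨i, ⟨⟨hi1, hi2⟩, hiF⟩, rfl⟩
      exact ⟨⟨hiF, by omega, by omega⟩, by omega⟩
  have e3 : T.filter (fun d => d + 1 ≤ K ∧ d + 1 ∈ F) = I.filter (fun i => i ∈ F ∧ i + 1 ∈ F) := by
    ext d
    simp only [hT, hI, Finset.mem_filter, Finset.mem_Icc]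
    constructor
    · rintro ⟨⟨hF, ha, _⟩, hb, hc⟩; exact ⟨⟨ha, by omega⟩, hF, hc⟩
    · rintro ⟨⟨ha, hb⟩, hF, hc⟩; exact ⟨⟨hF, ha, by omega⟩, by omega, hc⟩
  have himg : ((I.filter (fun i => i + 1 ∈ F)).image (fun i => i + 1)).card
      = (I.filter (fun i => i + 1 ∈ F)).card :=
    Finset.card_image_of_injective _ (add_left_injective 1)
  have hpart := Finset.card_filter_add_card_filter_not (s := I) (fun i => i ∉ F ∧ i + 1 ∉ F)
  have hneg : I.filter (fun i => ¬(i ∉ F ∧ i + 1 ∉ F))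
      = (I.filter (fun i => i ∈ F)) ∪ (I.filter (fun i => i + 1 ∈ F)) := by
    rw [← Finset.filter_or]
    apply Finset.filter_congr
    intro i _
    constructor
    · intro h; by_cases hF : i ∈ F
      · exact Or.inl hF
      · exact Or.inr (by tauto)
    · tauto
  have hinter : (I.filter (fun i => i ∈ F)) ∩ (I.filter (fun i => i + 1 ∈ F))
      = I.filter (fun i => i ∈ F ∧ i + 1 ∈ F) := by rw [← Finset.filter_and]
  have hcui := Finset.card_union_add_card_inter (I.filter (fun i => i ∈ F)) (I.filter (fun i => i + 1 ∈ F))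
  rw [hinter] at hcui
  rw [hneg] at hpart
  have hIcard : (I.card : Int) = K - 1 := by
    simp only [hI, Int.card_Icc]
    omega
  rw [hsplit, h1, h2, h3, e1, e2, e3, himg]
  omega

-- Bridge: the countP over the range equals the Finset card, and the list sum equals the Finset sum.
theorem key (K : Int) (t : List Int) :
    ((PySem.List.pyRange 1 (K + 1) 1).countP
        (fun d => decide (d ∉ PySem.Set.ofList t ∧ d + 1 ≤ K ∧ d + 1 ∉ PySem.Set.ofList t)) : Int)
    = (if 1 ≤ K then K - 1 else 0)
      - ((PySem.Set.ofList (t.filter (fun d => decide (1 ≤ d ∧ d ≤ K)))).map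
          (fun d => (if 2 ≤ d then (1 : Int) else 0) + (if d ≤ K - 1 then 1 else 0)
            - (if d + 1 ≤ K ∧ d + 1 ∈ PySem.Set.ofList (t.filter (fun d => decide (1 ≤ d ∧ d ≤ K))) then 1 else 0))).sum := by
  by_cases hK : 1 ≤ K
  · -- main case
    have hrange : (PySem.List.pyRange 1 (K + 1) 1).toFinset = Finset.Icc 1 K := by
      ext x
      simp only [List.mem_toFinset, PySem.List.mem_pyRange_one, Finset.mem_Icc]
      omega
    have hnodupR := PySem.List.nodup_pyRange_one (a := 1) (b := K + 1)
    have hcount : ((PySem.List.pyRange 1 (K + 1) 1).countP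
        (fun d => decide (d ∉ PySem.Set.ofList t ∧ d + 1 ≤ K ∧ d + 1 ∉ PySem.Set.ofList t)))
        = ((Finset.Icc 1 (K - 1)).filter (fun i => i ∉ t.toFinset ∧ i + 1 ∉ t.toFinset)).card := by
      rw [List.countP_eq_length_filter]
      rw [← List.toFinset_card_of_nodup (hnodupR.filter _)]
      rw [List.toFinset_filter, hrange]
      congr 1
      ext i
      simp only [Finset.mem_filter, Finset.mem_Icc, decide_eq_true_eq, PySem.Set.mem_ofList,
        List.mem_toFinset]
      constructor
      · rintro ⟨⟨ha, hb⟩, hc, hd, he⟩; exact ⟨⟨ha, by omega⟩, hc, he⟩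
      · rintro ⟨⟨ha, hb⟩, hc, he⟩; exact ⟨⟨ha, by omega⟩, hc, by omega, he⟩
    have hoccfin : (PySem.Set.ofList (t.filter (fun d => decide (1 ≤ d ∧ d ≤ K)))).toFinset
        = t.toFinset.filter (fun d => 1 ≤ d ∧ d ≤ K) := by
      ext d
      simp only [List.mem_toFinset, PySem.Set.mem_ofList, List.mem_filter, decide_eq_true_eq,
        Finset.mem_filter]
    have hsum : ((PySem.Set.ofList (t.filter (fun d => decide (1 ≤ d ∧ d ≤ K)))).map
          (fun d => (if 2 ≤ d then (1 : Int) else 0) + (if d ≤ K - 1 then 1 else 0)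
            - (if d + 1 ≤ K ∧ d + 1 ∈ PySem.Set.ofList (t.filter (fun d => decide (1 ≤ d ∧ d ≤ K))) then 1 else 0))).sum
        = ∑ d ∈ t.toFinset.filter (fun d => 1 ≤ d ∧ d ≤ K),
            ((if 2 ≤ d then (1 : Int) else 0) + (if d ≤ K - 1 then 1 else 0)
              - (if d + 1 ≤ K ∧ d + 1 ∈ t.toFinset then 1 else 0)) := by
      rw [← List.sum_toFinset _ (PySem.Set.nodup_ofList _)]
      rw [hoccfin]
      apply Finset.sum_congr rfl
      intro d hd
      simp only [Finset.mem_filter] at hd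
      congr 1
      apply if_congr _ rfl rfl
      constructor
      · rintro ⟨h1, h2⟩
        rw [PySem.Set.mem_ofList, List.mem_filter] at h2
        exact ⟨h1, List.mem_toFinset.mpr h2.1⟩
      · rintro ⟨h1, h2⟩
        refine ⟨h1, ?_⟩
        rw [PySem.Set.mem_ofList, List.mem_filter]
        exact ⟨List.mem_toFinset.mp h2, by simp; omega⟩
    rw [hcount, hsum, if_pos hK]
    exact count_ix K hK t.toFinset
  · -- K < 1 : empty range, empty occupied set
    have hr : PySem.List.pyRange 1 (K + 1) 1 = [] := PySem.List.pyRange_one_eq_nil (by omega)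
    have hf : t.filter (fun d => decide (1 ≤ d ∧ d ≤ K)) = [] := by
      rw [List.filter_eq_nil_iff]
      intro a _
      simp only [decide_eq_true_eq]
      omega
    rw [hr, hf]
    simp [hK, PySem.Set.ofList]

theorem main_eq (arr : List Int) : ArrayChallenge arr = ArrayChallenge_alt arr := by
  unfold ArrayChallenge ArrayChallenge_alt
  have hslice : PySem.List.slice arr (some 1) none = arr.drop 1 := by
    simpa using PySem.List.slice_from_natCast arr 1
  simp only [hslice]
  rw [stepA, stepB, key]

-- ===== VERDICT (by name: the statement is the Claim_ definition above) =====
theorem ArrayChallenge_spec : Claim_equal_ArrayChallenge := by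
  intro arr _ _
  exact main_eq arr
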